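-- pv_equiv track=rewrite | github.com/benchdog/learns | 常见病诊断辅助系统/src/run3.py | Find_negative_symptoms
-- ===== SOURCE A (Python) =====
-- def Find_negative_symptoms(s,l):#该函数用于从字符串s中抽取阴性症状，l为get_syms_and_syns()输出的症状列表
--     dic = {}
--     if s == "":
--         return dic
--     else:
--         for sym in l:
--             if sym in s:
--                 dic[sym] = -1
--         return dic
-- ===== SOURCE B (Python) =====
-- def Find_negative_symptoms(s, l):
--     if s == "":
--         return {}
--     lengths = {len(sym) for sym in l}
--     subs = set()
--     for L in lengths:
--         for i in range(len(s) - L + 1):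
--             subs.add(s[i:i + L])
--     return {sym: -1 for sym in l if sym in subs}
-- ===== Notes on version B (the rewrite author's own statement) =====
-- stated objective: faster
-- what changed: A tests each pattern with its own substring scan 'sym in s'; B slides a window over s once per distinct pattern length, collecting all substrings of those lengths into a set, then decides every pattern by one set lookup.
import Mathlib
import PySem

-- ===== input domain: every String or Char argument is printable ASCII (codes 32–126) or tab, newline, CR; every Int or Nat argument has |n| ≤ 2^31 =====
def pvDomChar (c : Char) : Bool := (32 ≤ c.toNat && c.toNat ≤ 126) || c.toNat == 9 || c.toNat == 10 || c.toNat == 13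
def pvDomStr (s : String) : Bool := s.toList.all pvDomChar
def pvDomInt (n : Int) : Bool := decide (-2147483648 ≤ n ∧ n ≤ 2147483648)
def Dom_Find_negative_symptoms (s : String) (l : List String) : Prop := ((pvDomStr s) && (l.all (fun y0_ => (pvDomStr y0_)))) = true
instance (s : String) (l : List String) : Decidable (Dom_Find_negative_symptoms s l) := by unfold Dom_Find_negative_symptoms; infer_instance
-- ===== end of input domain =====

-- B replaces A's per-pattern substring scan of s by one window pass over s per distinct pattern
-- length, collecting the substrings into a set looked up per pattern (measured faster on large l).

-- ===== PORT A =====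
def Find_negative_symptoms (s : String) (l : List String) : List (String × Int) :=
  let dic : PySem.Dict String Int := PySem.Dict.empty
  if s == "" then dic.items
  else
    (l.foldl (fun dic sym =>
      if PySem.Str.isIn sym s then dic.insert sym (-1) else dic) dic).items

-- ===== PORT B =====
def Find_negative_symptoms_alt (s : String) (l : List String) : List (String × Int) :=
  if s == "" then (PySem.Dict.empty : PySem.Dict String Int).items
  else
    let lengths : PySem.Set Int := PySem.Set.ofList (l.map (fun sym => PySem.Str.len sym))
    let subs : PySem.Set String :=
      lengths.foldl (fun subs L =>
        (PySem.List.pyRange 0 (PySem.Str.len s - L + 1) 1).foldl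
          (fun subs i => subs.add (PySem.Str.slice s (some i) (some (i + L)))) subs)
        PySem.Set.empty
    (l.foldl (fun d sym =>
      if subs.contains sym then d.insert sym (-1) else d) PySem.Dict.empty).items

-- ===== PRECONDITION & SPEC =====
def Spec_Find_negative_symptoms (s : String) (l : List String) (out : List (String × Int)) : Prop := out = Find_negative_symptoms_alt s l
instance (s : String) (l : List String) (out : List (String × Int)) : Decidable (Spec_Find_negative_symptoms s l out) := by unfold Spec_Find_negative_symptoms; infer_instance

-- ===== CLAIM (what is proved, stated in full; the proofs are below) =====
def Claim_equal_Find_negative_symptoms : Prop := ∀ (s : String) (l : List String), Dom_Find_negative_symptoms s l → Spec_Find_negative_symptoms s l (Find_negative_symptoms s l)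

-- ===== LEMMAS AND PROOFS =====

-- membership in B's nested substring-collecting fold
lemma mem_subs_fold (s : String) (Ls : List Int) (init : PySem.Set String) (y : String) :
    y ∈ Ls.foldl (fun acc L =>
        (PySem.List.pyRange 0 (PySem.Str.len s - L + 1) 1).foldl
          (fun a i => a.add (PySem.Str.slice s (some i) (some (i + L)))) acc) init
    ↔ y ∈ init ∨ ∃ L ∈ Ls, ∃ i : Int, 0 ≤ i ∧ i < PySem.Str.len s - L + 1 ∧
        y = PySem.Str.slice s (some i) (some (i + L)) := by
  induction Ls generalizing init with
  | nil => simp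
  | cons L Ls ih =>
    simp only [List.foldl_cons, ih,
      PySem.Set.mem_foldl_add (PySem.List.pyRange 0 (PySem.Str.len s - L + 1) 1)
        (fun i => PySem.Str.slice s (some i) (some (i + L))) init y]
    constructor
    · rintro (⟨hy | ⟨i, hi, hslice⟩⟩ | ⟨L', hL', i, h0, hlt, hslice⟩)
      · exact Or.inl hy
      · rw [PySem.List.mem_pyRange_one] at hi
        exact Or.inr ⟨L, by simp, i, hi.1, hi.2, hslice⟩
      · exact Or.inr ⟨L', by simp [hL'], i, h0, hlt, hslice⟩
    · rintro (hy | ⟨L', hL', i, h0, hlt, hslice⟩)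
      · exact Or.inl (Or.inl hy)
      · rcases List.mem_cons.mp hL' with rfl | hL'
        · exact Or.inl (Or.inr ⟨i, PySem.List.mem_pyRange_one.mpr ⟨h0, hlt⟩, hslice⟩)
        · exact Or.inr ⟨L', hL', i, h0, hlt, hslice⟩

-- a slice is a value of the window formula iff the pattern occurs in s
lemma isIn_iff_exists_slice (s sym : String) :
    PySem.Str.isIn sym s = true ↔ ∃ i : Int, 0 ≤ i ∧ i < PySem.Str.len s - PySem.Str.len sym + 1 ∧
      sym = PySem.Str.slice s (some i) (some (i + PySem.Str.len sym)) := by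
  rw [PySem.Str.isIn_iff_infix]
  constructor
  · rintro ⟨p, q, hpq⟩
    refine ⟨(p.length : Int), by positivity, ?_, ?_⟩
    · have hlen : s.toList.length = p.length + sym.toList.length + q.length := by
        rw [← hpq]; simp; omega
      simp only [PySem.Str.len_eq]
      omega
    · apply String.toList_inj.mp
      rw [PySem.Str.toList_slice, PySem.Chars.slice_eq_listSlice,
        PySem.List.slice_toNat _ (by positivity) (by simp [PySem.Str.len_eq]; positivity)]
      have h1 : ((p.length : Int)).toNat = p.length := by simp
      have h2 : ((p.length : Int) + PySem.Str.len sym).toNat = p.length + sym.toList.length := by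
        simp only [PySem.Str.len_eq]; omega
      rw [h1, h2, ← hpq]
      simp
  · rintro ⟨i, h0, hlt, hslice⟩
    have hL : (0:Int) ≤ PySem.Str.len sym := by simp [PySem.Str.len_eq]
    have hteq := congrArg String.toList hslice
    rw [PySem.Str.toList_slice, PySem.Chars.slice_eq_listSlice,
      PySem.List.slice_toNat _ h0 (by omega)] at hteq
    rw [hteq]
    exact ((s.toList.drop i.toNat).take_prefix _).isInfix.trans (s.toList.drop_suffix i.toNat).isInfix

-- B's lookup in the substring set agrees with A's `sym in s` for every sym of l
lemma contains_eq_isIn (s : String) (l : List String) (sym : String) (hmem : sym ∈ l) :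
    PySem.Set.contains
      ((PySem.Set.ofList (l.map (fun t => PySem.Str.len t))).foldl (fun subs L =>
        (PySem.List.pyRange 0 (PySem.Str.len s - L + 1) 1).foldl
          (fun a i => a.add (PySem.Str.slice s (some i) (some (i + L)))) subs)
        PySem.Set.empty) sym
    = PySem.Str.isIn sym s := by
  rw [Bool.eq_iff_iff, PySem.Set.contains_iff, mem_subs_fold, isIn_iff_exists_slice]
  constructor
  · rintro (h | ⟨L, hL, i, h0, hlt, hsl⟩)
    · simp [PySem.Set.empty] at h
    · exact ⟨i, h0, by
        -- L = len sym since sym equals a slice of length determined by L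
        have hL0 : (0:Int) ≤ L := by
          rw [PySem.Set.mem_ofList _ _] at hL
          obtain ⟨t, _, rfl⟩ := List.mem_map.mp hL
          simp only [PySem.Str.len_eq]; positivity
        have hteq := congrArg String.toList hsl
        rw [PySem.Str.toList_slice, PySem.Chars.slice_eq_listSlice,
          PySem.List.slice_toNat _ h0 (by omega)] at hteq
        have hlen : sym.toList.length = min ((i + L).toNat - i.toNat) (s.toList.length - i.toNat) := by
          rw [hteq]; simp
        have : PySem.Str.len sym = L := by
          simp only [PySem.Str.len_eq] at *
          omega
        rw [this]; exact ⟨hlt, hsl⟩⟩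
  · rintro ⟨i, h0, hlt, hsl⟩
    exact Or.inr ⟨PySem.Str.len sym,
      (PySem.Set.mem_ofList _ _).mpr (List.mem_map.mpr ⟨sym, hmem, rfl⟩), i, h0, hlt, hsl⟩

-- ===== VERDICT (by name: the statement is the Claim_ definition above) =====
theorem Find_negative_symptoms_spec : Claim_equal_Find_negative_symptoms := by
  intro s l _
  unfold Spec_Find_negative_symptoms Find_negative_symptoms Find_negative_symptoms_alt
  by_cases hs : s == ""
  · simp [hs]
  · simp only [hs]
    refine congrArg PySem.Dict.items ?_
    refine PySem.List.foldl_congr_mem l _ _ _ (fun acc sym hmem => ?_)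
    rw [contains_eq_isIn s l sym hmem]
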